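-- pv_equiv track=rewrite | github.com/fe-aryan/Python | punarjanam/test.py | construct_matrices
-- ===== SOURCE A (Python) =====
-- def construct_matrices(n):
--     A = []
--     B = []
--     for i in range(n):
--         row_a = [(i+j) % n + 1 for j in range(n)]
--         row_b = [(i-j+n) % n + 1 for j in range(n)]
--         A.append(row_a)
--         B.append(row_b)
--     return A, B
-- ===== SOURCE B (Python) =====
-- def construct_matrices(n):
--     # Maintain the current rows and rotate them, instead of recomputing (i+/-j)%n per cell.
--     row_a = list(range(1, n + 1))
--     row_b = [1] + list(range(n, 1, -1))
--     A = []
--     B = []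
--     for _ in range(n):
--         A.append(row_a)
--         B.append(row_b)
--         row_a = row_a[1:] + row_a[:1]     # left rotate
--         row_b = row_b[-1:] + row_b[:-1]   # right rotate
--     return A, B
-- ===== Notes on version B (the rewrite author's own statement) =====
-- stated objective: alternative
-- what changed: B builds only the first row of each matrix explicitly and derives every subsequent row by rotating the previous one (left for A, right for B), instead of recomputing (i+j)%n and (i-j+n)%n for every cell.
import Mathlib
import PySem

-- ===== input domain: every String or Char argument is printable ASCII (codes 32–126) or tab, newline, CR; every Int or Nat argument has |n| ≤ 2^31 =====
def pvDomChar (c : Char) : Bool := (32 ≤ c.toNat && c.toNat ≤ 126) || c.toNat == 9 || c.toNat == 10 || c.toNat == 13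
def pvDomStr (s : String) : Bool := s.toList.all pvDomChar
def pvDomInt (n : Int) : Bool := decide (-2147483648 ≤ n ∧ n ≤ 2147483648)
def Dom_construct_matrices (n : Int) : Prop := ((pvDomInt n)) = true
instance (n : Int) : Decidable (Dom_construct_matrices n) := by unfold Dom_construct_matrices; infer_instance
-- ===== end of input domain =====

-- B builds only the first row of each matrix and derives each next row by rotating the previous
-- one (left / right) instead of recomputing (i±j)%n per cell; objective: alternative.

-- ===== PORT A =====
def construct_matrices (n : Int) : List (List Int) × List (List Int) :=
  (PySem.List.pyRange 0 n 1).foldl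
    (fun AB i =>
      let row_a := (PySem.List.pyRange 0 n 1).map (fun j => PySem.Int.mod (i + j) n + 1)
      let row_b := (PySem.List.pyRange 0 n 1).map (fun j => PySem.Int.mod (i - j + n) n + 1)
      (AB.1 ++ [row_a], AB.2 ++ [row_b]))
    ([], [])

-- ===== PORT B =====
def construct_matrices_alt (n : Int) : List (List Int) × List (List Int) :=
  let row_a0 : List Int := PySem.List.pyRange 1 (n + 1) 1
  let row_b0 : List Int := 1 :: PySem.List.pyRange n 1 (-1)
  let s := (PySem.List.pyRange 0 n 1).foldl
    (fun (s : List (List Int) × List (List Int) × List Int × List Int) _ =>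
      (s.1 ++ [s.2.2.1], s.2.1 ++ [s.2.2.2],
       PySem.List.slice s.2.2.1 (some 1) none ++ PySem.List.slice s.2.2.1 none (some 1),
       PySem.List.slice s.2.2.2 (some (-1)) none ++ PySem.List.slice s.2.2.2 none (some (-1))))
    ([], [], row_a0, row_b0)
  (s.1, s.2.1)

-- ===== PRECONDITION & SPEC =====
def Spec_construct_matrices (n : Int) (out : List (List Int) × List (List Int)) : Prop := out = construct_matrices_alt n
instance (n : Int) (out : List (List Int) × List (List Int)) : Decidable (Spec_construct_matrices n out) := by unfold Spec_construct_matrices; infer_instance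

-- ===== CLAIM (what is proved, stated in full; the proofs are below) =====
def Claim_equal_construct_matrices : Prop := ∀ (n : Int), Dom_construct_matrices n → Spec_construct_matrices n (construct_matrices n)

-- ===== LEMMAS AND PROOFS =====

-- A's row shapes, as functions of the row index i (List.range form for the proofs)
def rowA (n i : Int) : List Int := List.map (fun (k : Nat) => PySem.Int.mod (i + (k : Int)) n + 1) (List.range n.toNat)
def rowB (n i : Int) : List Int := List.map (fun (k : Nat) => PySem.Int.mod (i - (k : Int) + n) n + 1) (List.range n.toNat)

theorem mod_self_of_range (n a : Int) (h0 : 0 ≤ a) (h1 : a < n) : PySem.Int.mod a n = a := by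
  rw [PySem.Int.mod_eq_emod_of_pos (lt_of_le_of_lt h0 h1)]
  exact Int.emod_eq_of_lt h0 h1

theorem mod_add_self (a n : Int) (hn : 0 < n) : PySem.Int.mod (a + n) n = PySem.Int.mod a n := by
  rw [PySem.Int.mod_eq_emod_of_pos hn, PySem.Int.mod_eq_emod_of_pos hn, Int.add_emod_right]

theorem pyRowA (n i : Int) :
    (PySem.List.pyRange 0 n 1).map (fun j => PySem.Int.mod (i + j) n + 1) = rowA n i := by
  rw [PySem.List.pyRange_one, List.map_map]
  unfold rowA
  simp [Function.comp]

theorem pyRowB (n i : Int) :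
    (PySem.List.pyRange 0 n 1).map (fun j => PySem.Int.mod (i - j + n) n + 1) = rowB n i := by
  rw [PySem.List.pyRange_one, List.map_map]
  unfold rowB
  simp [Function.comp]

theorem foldl_pair_append (f g : Int → List Int) (l : List Int)
    (a b : List (List Int)) :
    l.foldl (fun AB i => (AB.1 ++ [f i], AB.2 ++ [g i])) (a, b)
      = (a ++ l.map f, b ++ l.map g) := by
  induction l generalizing a b with
  | nil => simp
  | cons x xs ih => simp [List.foldl_cons, ih]

theorem rowA_zero (n : Int) : rowA n 0 = PySem.List.pyRange 1 (n + 1) 1 := by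
  unfold rowA
  rw [PySem.List.pyRange_one 1 (n + 1)]
  simp only [add_sub_cancel_right]
  apply List.map_congr_left
  intro k hk
  simp only [List.mem_range] at hk
  rw [zero_add, mod_self_of_range n k (by positivity) (by omega)]
  ring

theorem rowB_zero (n : Int) (hn : 0 < n) : rowB n 0 = 1 :: PySem.List.pyRange n 1 (-1) := by
  have hN : ((n.toNat : Int)) = n := Int.toNat_of_nonneg (by omega)
  unfold rowB
  rw [PySem.List.pyRange_neg_one n 1]
  apply List.ext_getElem
  · simp; omega
  · intro m hm hm'
    match m with
    | 0 =>
      simp only [List.getElem_map, List.getElem_range, List.getElem_cons_zero]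
      rw [show (0:Int) - (0:Nat) + n = 0 + n by push_cast; ring, mod_add_self 0 n hn,
        mod_self_of_range n 0 le_rfl hn]
      omega
    | Nat.succ m =>
      simp only [List.getElem_map, List.getElem_range, List.getElem_cons_succ]
      simp only [List.length_map, List.length_range] at hm
      rw [show (0:Int) - ((m+1 : Nat) : Int) + n = n - 1 - m by push_cast; ring,
        mod_self_of_range n (n - 1 - m) (by omega) (by omega)]
      ring

theorem rotA (n i : Int) (hn : 0 < n) :
    PySem.List.slice (rowA n i) (some 1) none ++ PySem.List.slice (rowA n i) none (some 1)
      = rowA n (i + 1) := by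
  have hN : ((n.toNat : Int)) = n := Int.toNat_of_nonneg (by omega)
  have hN1 : 1 ≤ n.toNat := by omega
  rw [PySem.List.slice_from_one,
    show PySem.List.slice (rowA n i) none (some 1) = (rowA n i).take 1 from by
      rw [show (1:Int) = ((1:Nat):Int) from rfl, PySem.List.slice_to_natCast]]
  unfold rowA
  apply List.ext_getElem
  · simp; omega
  · intro m hm hm'
    simp only [List.length_append, List.length_tail, List.length_take, List.length_map,
      List.length_range] at hm
    by_cases hlt : m < n.toNat - 1
    · rw [List.getElem_append_left (by simp; omega)]
      simp only [List.getElem_tail, List.getElem_map, List.getElem_range]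
      congr 2
      push_cast
      ring
    · have hm1 : m = n.toNat - 1 := by omega
      rw [List.getElem_append_right (by simp; omega)]
      simp only [List.length_tail, List.length_map, List.length_range, List.getElem_take,
        List.getElem_map, List.getElem_range]
      have h0 : m - (n.toNat - 1) = 0 := by omega
      rw [h0]
      simp only [Nat.cast_zero, add_zero]
      rw [show i + 1 + ((m : Nat) : Int) = i + n by
            subst hm1; rw [Nat.cast_sub hN1, hN]; push_cast; ring,
        mod_add_self i n hn]

theorem rotB (n i : Int) (hn : 0 < n) :
    PySem.List.slice (rowB n i) (some (-1)) none ++ PySem.List.slice (rowB n i) none (some (-1))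
      = rowB n (i + 1) := by
  have hN : ((n.toNat : Int)) = n := Int.toNat_of_nonneg (by omega)
  have hN1 : 1 ≤ n.toNat := by omega
  rw [PySem.List.slice_from_neg_one, PySem.List.slice_to_neg_one]
  unfold rowB
  apply List.ext_getElem
  · simp only [List.length_append, List.length_drop, List.length_dropLast, List.length_map,
      List.length_range]
    omega
  · intro m hm hm'
    simp only [List.length_append, List.length_drop, List.length_dropLast, List.length_map,
      List.length_range] at hm
    match m with
    | 0 =>
      rw [List.getElem_append_left (by
        simp only [List.length_drop, List.length_map, List.length_range]; omega)]
      simp only [List.getElem_drop, List.length_map, List.length_range, Nat.add_zero,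
        List.getElem_map, List.getElem_range]
      rw [show i - (((n.toNat - 1 : Nat)) : Int) + n = i + 1 by
            rw [Nat.cast_sub hN1, hN]; push_cast; ring]
      rw [show i + 1 - ((0:Nat) : Int) + n = (i + 1) + n by push_cast; ring,
        mod_add_self (i + 1) n hn]
    | Nat.succ m =>
      rw [List.getElem_append_right (by
        simp only [List.length_drop, List.length_map, List.length_range]; omega)]
      simp only [List.length_drop, List.length_map, List.length_range, List.getElem_dropLast,
        List.getElem_map, List.getElem_range]
      have h1 : m + 1 - (n.toNat - (n.toNat - 1)) = m := by omega
      rw [h1]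
      congr 2
      push_cast
      ring

theorem loopB (n : Int) (hn : 0 < n) (l : List Int) (a b : List (List Int)) (i : Int) :
    l.foldl
      (fun (s : List (List Int) × List (List Int) × List Int × List Int) _ =>
        (s.1 ++ [s.2.2.1], s.2.1 ++ [s.2.2.2],
         PySem.List.slice s.2.2.1 (some 1) none ++ PySem.List.slice s.2.2.1 none (some 1),
         PySem.List.slice s.2.2.2 (some (-1)) none ++ PySem.List.slice s.2.2.2 none (some (-1))))
      (a, b, rowA n i, rowB n i)
    = (a ++ List.map (fun (k : Nat) => rowA n (i + (k : Int))) (List.range l.length),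
       b ++ List.map (fun (k : Nat) => rowB n (i + (k : Int))) (List.range l.length),
       rowA n (i + (l.length : Int)), rowB n (i + (l.length : Int))) := by
  induction l generalizing a b i with
  | nil => simp
  | cons x xs ih =>
    simp only [List.foldl_cons]
    rw [rotA n i hn, rotB n i hn, ih (a ++ [rowA n i]) (b ++ [rowB n i]) (i + 1)]
    simp only [List.length_cons, List.range_succ_eq_map, List.map_cons, List.map_map,
      Prod.mk.injEq]
    refine ⟨?_, ?_, by congr 1; push_cast; ring, by congr 1; push_cast; ring⟩
    · rw [List.append_assoc]
      congr 1
      simp only [Nat.cast_zero, add_zero, List.cons_append, List.nil_append, List.cons.injEq,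
        true_and]
      apply List.map_congr_left
      intro k _
      simp only [Function.comp]
      congr 1
      push_cast
      ring
    · rw [List.append_assoc]
      congr 1
      simp only [Nat.cast_zero, add_zero, List.cons_append, List.nil_append, List.cons.injEq,
        true_and]
      apply List.map_congr_left
      intro k _
      simp only [Function.comp]
      congr 1
      push_cast
      ring

-- ===== VERDICT (by name: the statement is the Claim_ definition above) =====
theorem construct_matrices_spec : Claim_equal_construct_matrices := by
  intro n _
  unfold Spec_construct_matrices construct_matrices construct_matrices_alt
  by_cases hn : 0 < n
  · simp only [pyRowA, pyRowB]
    rw [foldl_pair_append (rowA n) (rowB n)]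
    rw [← rowA_zero n, ← rowB_zero n hn,
      loopB n hn (PySem.List.pyRange 0 n 1) [] [] 0]
    simp only [List.nil_append]
    rw [PySem.List.pyRange_one 0 n, List.map_map]
    simp only [List.length_map, List.length_range, sub_zero, List.map_map, Prod.mk.injEq]
    constructor <;>
      (apply List.map_congr_left; intro k _; simp [Function.comp])
  · have h : PySem.List.pyRange 0 n 1 = [] := PySem.List.pyRange_one_eq_nil (by omega)
    rw [h]
    rfl
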